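-- pv_equiv track=rewrite | github.com/chevaro1/polo-web-scraper | product_details_old/product_details310721.py | gender
-- ===== SOURCE A (Python) =====
-- gend = [["men", " man", 3], ["men", " men", 3], ["men", " male", 3], ["women", "woman", 3], ["women", "women", 3], ["women", "female", 3], ["women", "ladies", 3], ["women", "lady", 3], ["child", "child", 4], ["child", "kid", 4], ["child", "junior", 4], ["child","baby", 4]]
--
-- def gender(product):
--     name = []
--     weight = []
--
--     for i in gend:
--         if i[1] in product:
--             name.append(i[0])
--             weight.append(i[2])
--
--     if len(weight) != 0:
--
--         m = max(weight)
--         res = [i for i, j in enumerate(weight) if j == m]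
--         final = []
--
--
--         for i in res:
--             final.append(name[i])
--
--         ret = ' '.join(final)
--         return ret
--     else:
--         return "unknown"
-- ===== SOURCE B (Python) =====
-- gend = [["men", " man", 3], ["men", " men", 3], ["men", " male", 3], ["women", "woman", 3], ["women", "women", 3], ["women", "female", 3], ["women", "ladies", 3], ["women", "lady", 3], ["child", "child", 4], ["child", "kid", 4], ["child", "junior", 4], ["child","baby", 4]]
--
-- def gender(product):
--     best = 0
--     names = []
--     for label, kw, w in gend:
--         if kw in product:
--             if w > best:
--                 best = w
--                 names = [label]
--             elif w == best:
--                 names.append(label)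
--     return ' '.join(names) if names else "unknown"
-- ===== Notes on version B (the rewrite author's own statement) =====
-- stated objective: simpler
-- what changed: Replaced A's build-two-lists-then-rescan (max over weights, enumerate-filter for max indices, second loop to collect names) with a single pass over gend keeping a running best weight and the list of names at that weight.
import Mathlib
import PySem

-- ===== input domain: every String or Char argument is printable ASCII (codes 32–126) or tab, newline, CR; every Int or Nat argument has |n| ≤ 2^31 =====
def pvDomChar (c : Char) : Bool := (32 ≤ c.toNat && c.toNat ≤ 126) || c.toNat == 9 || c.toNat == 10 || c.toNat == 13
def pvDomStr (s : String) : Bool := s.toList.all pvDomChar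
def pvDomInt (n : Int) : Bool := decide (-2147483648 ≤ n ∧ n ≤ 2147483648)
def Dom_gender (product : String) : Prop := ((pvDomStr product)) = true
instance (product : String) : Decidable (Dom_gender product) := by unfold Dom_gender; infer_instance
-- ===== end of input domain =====

-- B replaces A's build-two-lists-then-rescan with a single pass keeping a running best
-- weight and the names at that weight (objective: simpler; same return value).

-- the module-level constant `gend` (shared data, not code)
def gend : List (String × String × Int) :=
  [("men", " man", 3), ("men", " men", 3), ("men", " male", 3), ("women", "woman", 3),
   ("women", "women", 3), ("women", "female", 3), ("women", "ladies", 3), ("women", "lady", 3),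
   ("child", "child", 4), ("child", "kid", 4), ("child", "junior", 4), ("child", "baby", 4)]

-- ===== PORT A =====
def gender (product : String) : String :=
  let st := gend.foldl (fun (acc : List String × List Int) i =>
      if PySem.Str.isIn i.2.1 product then (acc.1 ++ [i.1], acc.2 ++ [i.2.2]) else acc)
    ([], [])
  let name := st.1
  let weight := st.2
  if weight.length ≠ 0 then
    -- max(weight): weight is nonempty here, so the .getD default is never used
    let m := (PySem.List.max? weight (fun x => x)).getD 0
    let res := ((PySem.List.enumerate weight).filter (fun p => p.2 == m)).map (·.1)
    let final := res.foldl (fun acc i => acc ++ [(PySem.List.pyGet? name i).getD ""]) []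
    PySem.Str.join " " final
  else "unknown"

-- ===== PORT B =====
def gender_alt (product : String) : String :=
  let st := gend.foldl (fun (acc : Int × List String) i =>
      if PySem.Str.isIn i.2.1 product then
        if i.2.2 > acc.1 then (i.2.2, [i.1])
        else if i.2.2 == acc.1 then (acc.1, acc.2 ++ [i.1])
        else acc
      else acc)
    (0, [])
  if st.2 ≠ [] then PySem.Str.join " " st.2 else "unknown"

-- ===== PRECONDITION & SPEC =====
def Spec_gender (product : String) (out : String) : Prop := out = gender_alt product
instance (product : String) (out : String) : Decidable (Spec_gender product out) := by unfold Spec_gender; infer_instance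

-- ===== CLAIM (what is proved, stated in full; the proofs are below) =====
def Claim_equal_gender : Prop := ∀ (product : String), Dom_gender product → Spec_gender product (gender product)

-- ===== LEMMAS AND PROOFS =====

set_option maxHeartbeats 4000000

-- Both ports depend on `product` only through the 12 substring tests; `genderBitsA`/
-- `genderBitsB` are the same computations with those tests abstracted as Booleans.
def bitsGend (b1 b2 b3 b4 b5 b6 b7 b8 b9 b10 b11 b12 : Bool) :
    List (String × Bool × Int) :=
  [("men", b1, 3), ("men", b2, 3), ("men", b3, 3), ("women", b4, 3),
   ("women", b5, 3), ("women", b6, 3), ("women", b7, 3), ("women", b8, 3),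
   ("child", b9, 4), ("child", b10, 4), ("child", b11, 4), ("child", b12, 4)]

def genderBitsA (b1 b2 b3 b4 b5 b6 b7 b8 b9 b10 b11 b12 : Bool) : String :=
  let st := (bitsGend b1 b2 b3 b4 b5 b6 b7 b8 b9 b10 b11 b12).foldl
      (fun (acc : List String × List Int) i =>
        if i.2.1 then (acc.1 ++ [i.1], acc.2 ++ [i.2.2]) else acc)
    ([], [])
  let name := st.1
  let weight := st.2
  if weight.length ≠ 0 then
    let m := (PySem.List.max? weight (fun x => x)).getD 0
    let res := ((PySem.List.enumerate weight).filter (fun p => p.2 == m)).map (·.1)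
    let final := res.foldl (fun acc i => acc ++ [(PySem.List.pyGet? name i).getD ""]) []
    PySem.Str.join " " final
  else "unknown"

def genderBitsB (b1 b2 b3 b4 b5 b6 b7 b8 b9 b10 b11 b12 : Bool) : String :=
  let st := (bitsGend b1 b2 b3 b4 b5 b6 b7 b8 b9 b10 b11 b12).foldl
      (fun (acc : Int × List String) i =>
        if i.2.1 then
          if i.2.2 > acc.1 then (i.2.2, [i.1])
          else if i.2.2 == acc.1 then (acc.1, acc.2 ++ [i.1])
          else acc
        else acc)
    (0, [])
  if st.2 ≠ [] then PySem.Str.join " " st.2 else "unknown"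

theorem bitsGend_eq_map (product : String) :
    bitsGend (PySem.Str.isIn " man" product) (PySem.Str.isIn " men" product)
      (PySem.Str.isIn " male" product) (PySem.Str.isIn "woman" product)
      (PySem.Str.isIn "women" product) (PySem.Str.isIn "female" product)
      (PySem.Str.isIn "ladies" product) (PySem.Str.isIn "lady" product)
      (PySem.Str.isIn "child" product) (PySem.Str.isIn "kid" product)
      (PySem.Str.isIn "junior" product) (PySem.Str.isIn "baby" product)
    = gend.map (fun i => (i.1, PySem.Str.isIn i.2.1 product, i.2.2)) := rfl

theorem gender_eq_bitsA (product : String) :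
    gender product = genderBitsA
      (PySem.Str.isIn " man" product) (PySem.Str.isIn " men" product)
      (PySem.Str.isIn " male" product) (PySem.Str.isIn "woman" product)
      (PySem.Str.isIn "women" product) (PySem.Str.isIn "female" product)
      (PySem.Str.isIn "ladies" product) (PySem.Str.isIn "lady" product)
      (PySem.Str.isIn "child" product) (PySem.Str.isIn "kid" product)
      (PySem.Str.isIn "junior" product) (PySem.Str.isIn "baby" product) := by
  simp only [gender, genderBitsA]
  rw [bitsGend_eq_map product]
  simp only [List.foldl_map]

theorem gender_alt_eq_bitsB (product : String) :
    gender_alt product = genderBitsB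
      (PySem.Str.isIn " man" product) (PySem.Str.isIn " men" product)
      (PySem.Str.isIn " male" product) (PySem.Str.isIn "woman" product)
      (PySem.Str.isIn "women" product) (PySem.Str.isIn "female" product)
      (PySem.Str.isIn "ladies" product) (PySem.Str.isIn "lady" product)
      (PySem.Str.isIn "child" product) (PySem.Str.isIn "kid" product)
      (PySem.Str.isIn "junior" product) (PySem.Str.isIn "baby" product) := by
  simp only [gender_alt, genderBitsB]
  rw [bitsGend_eq_map product, List.foldl_map]

theorem bits_eq : ∀ b1 b2 b3 b4 b5 b6 b7 b8 b9 b10 b11 b12 : Bool,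
    genderBitsA b1 b2 b3 b4 b5 b6 b7 b8 b9 b10 b11 b12 =
    genderBitsB b1 b2 b3 b4 b5 b6 b7 b8 b9 b10 b11 b12 := by
  intro b1 b2 b3 b4 b5 b6 b7 b8 b9 b10 b11 b12
  cases b1 <;> cases b2 <;> cases b3 <;> cases b4 <;> cases b5 <;> cases b6 <;>
    cases b7 <;> cases b8 <;> cases b9 <;> cases b10 <;> cases b11 <;> cases b12 <;> rfl

-- ===== VERDICT (by name: the statement is the Claim_ definition above) =====
theorem gender_spec : Claim_equal_gender := by
  intro product _
  unfold Spec_gender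
  rw [gender_eq_bitsA, gender_alt_eq_bitsB, bits_eq]
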